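-- pv_equiv track=rewrite | github.com/hybridvamp/baesuzy | utils.py | remove_escapes
-- ===== SOURCE A (Python) =====
-- def remove_escapes(text: str) -> str:
--     res = ""
--     is_escaped = False
--     for counter in range(len(text)):
--         if is_escaped:
--             res += text[counter]
--             is_escaped = False
--         elif text[counter] == "\\":
--             is_escaped = True
--         else:
--             res += text[counter]
--     return res
-- ===== SOURCE B (Python) =====
-- import re
--
-- def remove_escapes(text: str) -> str:
--     return re.sub(r"\\(.?)", r"\1", text, flags=re.DOTALL)
-- ===== Notes on version B (the rewrite author's own statement) =====
-- stated objective: idiomatic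
-- what changed: Replaces the manual character-by-character is_escaped state machine with a single regex substitution (backslash plus optional following character, DOTALL, replaced by that character), letting the regex engine do the scan.
import Mathlib
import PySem

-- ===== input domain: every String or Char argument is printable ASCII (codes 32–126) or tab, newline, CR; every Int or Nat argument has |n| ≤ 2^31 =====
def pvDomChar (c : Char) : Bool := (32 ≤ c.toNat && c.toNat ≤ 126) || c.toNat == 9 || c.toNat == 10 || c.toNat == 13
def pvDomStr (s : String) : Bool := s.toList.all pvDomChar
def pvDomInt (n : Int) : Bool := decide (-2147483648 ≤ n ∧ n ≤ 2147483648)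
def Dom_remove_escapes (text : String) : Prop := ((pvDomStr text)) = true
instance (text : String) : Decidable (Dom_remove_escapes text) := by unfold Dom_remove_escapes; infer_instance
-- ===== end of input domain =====

-- B replaces A's character-by-character is_escaped state machine with one regex
-- substitution re.sub(r"\\(.?)", r"\1", ..., re.DOTALL); same output, more idiomatic.


-- ===== PORT A =====
-- literal port of A: fold over the characters with accumulator (res, is_escaped)
def remove_escapes (text : String) : String :=
  String.ofList (text.toList.foldl
    (fun (s : List Char × Bool) c =>
      if s.2 then (s.1 ++ [c], false)
      else if c = '\\' then (s.1, true)
      else (s.1 ++ [c], false))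
    ([], false)).1

-- ===== PORT B =====
-- port of B's regex: re.sub(r"\\(.?)", r"\1", text, re.DOTALL) scans left to right,
-- each non-overlapping match is a backslash plus its (optional) next character, and
-- the replacement keeps only that character.
def reSubEsc : List Char → List Char
  | [] => []
  | '\\' :: c :: rest => c :: reSubEsc rest
  | '\\' :: [] => []
  | c :: rest => c :: reSubEsc rest

def remove_escapes_alt (text : String) : String := String.ofList (reSubEsc text.toList)

-- ===== PRECONDITION & SPEC =====
def Spec_remove_escapes (text : String) (out : String) : Prop := out = remove_escapes_alt text
instance (text : String) (out : String) : Decidable (Spec_remove_escapes text out) := by unfold Spec_remove_escapes; infer_instance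

-- ===== CLAIM (what is proved, stated in full; the proofs are below) =====
def Claim_equal_remove_escapes : Prop := ∀ (text : String), Dom_remove_escapes text → Spec_remove_escapes text (remove_escapes text)

-- ===== LEMMAS AND PROOFS =====
def escStep : List Char × Bool → Char → List Char × Bool :=
  fun s c =>
    if s.2 then (s.1 ++ [c], false)
    else if c = '\\' then (s.1, true)
    else (s.1 ++ [c], false)

-- value of B's scan when A's automaton is in the escaped state
def reSubEscT : List Char → List Char
  | [] => []
  | c :: rest => c :: reSubEsc rest

theorem foldl_escStep (l : List Char) : ∀ acc : List Char,
    (l.foldl escStep (acc, false)).1 = acc ++ reSubEsc l ∧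
    (l.foldl escStep (acc, true)).1 = acc ++ reSubEscT l := by
  induction l with
  | nil => intro acc; simp [reSubEsc, reSubEscT]
  | cons c rest ih =>
    intro acc
    constructor
    · by_cases h : c = '\\'
      · subst h
        have : (('\\' :: rest).foldl escStep (acc, false)) = rest.foldl escStep (acc, true) := by
          simp [escStep]
        rw [this, (ih acc).2]
        cases rest <;> simp [reSubEsc, reSubEscT]
      · have : ((c :: rest).foldl escStep (acc, false)) = rest.foldl escStep (acc ++ [c], false) := by
          simp [escStep, h]
        rw [this, (ih (acc ++ [c])).1]
        cases rest with
        | nil => simp [reSubEsc, h]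
        | cons d r =>
          by_cases hd : d = '\\' <;> simp [reSubEsc, h, hd]
    · have : ((c :: rest).foldl escStep (acc, true)) = rest.foldl escStep (acc ++ [c], false) := by
        simp [escStep]
      rw [this, (ih (acc ++ [c])).1]
      simp [reSubEscT]

-- ===== VERDICT (by name: the statement is the Claim_ definition above) =====
theorem remove_escapes_spec : Claim_equal_remove_escapes := by
  intro text _
  unfold Spec_remove_escapes remove_escapes remove_escapes_alt
  show String.ofList ((text.toList.foldl escStep ([], false)).1) = _
  rw [(foldl_escStep text.toList []).1]
  simp
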